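-- pv_equiv track=rewrite | github.com/keing1/advent-of-code-2020 | day_08/handheld_halting.py | find_backwards_reachable_instructions
-- ===== SOURCE A (Python) =====
-- def create_reverse_edge_graph(parsed_instructions):
-- 	edge_graph = {}
--
-- 	for line, instruction in enumerate(parsed_instructions):
-- 		instr_name = instruction[0]
-- 		instr_val = instruction[1]
--
-- 		if instr_name == 'jmp':
-- 			dest_line = line + instr_val
-- 		else:
-- 			dest_line = line + 1
--
-- 		if dest_line in edge_graph:
-- 			edge_graph[dest_line] += [line]
-- 		else:
-- 			edge_graph[dest_line] = [line]
--
-- 	return edge_graph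
--
-- def find_backwards_reachable_instructions(parsed_instructions):
-- 	reverse_edge_graph = create_reverse_edge_graph(parsed_instructions)
-- 	backwards_reachable_instructions = set()
--
-- 	current_instructions = [len(parsed_instructions)]
--
-- 	while len(current_instructions) > 0:
-- 		active_instr = current_instructions.pop()
-- 		if active_instr in reverse_edge_graph:
-- 			next_instrs = reverse_edge_graph[active_instr]
--
-- 		next_instr_set = set(next_instrs)
-- 		cleaned_next_instr_set = \
-- 			next_instr_set.difference(backwards_reachable_instructions)
--
-- 		current_instructions += list(cleaned_next_instr_set)
-- 		backwards_reachable_instructions = \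
-- 			backwards_reachable_instructions.union(cleaned_next_instr_set)
--
-- 	return backwards_reachable_instructions
-- ===== SOURCE B (Python) =====
-- def find_backwards_reachable_instructions(parsed_instructions):
-- 	n = len(parsed_instructions)
-- 	dests = [line + val if name == 'jmp' else line + 1
-- 	         for line, (name, val) in enumerate(parsed_instructions)]
--
-- 	# Backward data-flow fixed point: a line is backwards-reachable from the
-- 	# program end iff its destination is the end or is itself reachable.
-- 	# Sweep the lines from high to low until a full sweep changes nothing.
-- 	reachable = [False] * n
-- 	changed = True
-- 	while changed:
-- 		changed = False
-- 		for line in range(n - 1, -1, -1):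
-- 			if not reachable[line]:
-- 				dest = dests[line]
-- 				if dest == n or (0 <= dest < n and reachable[dest]):
-- 					reachable[line] = True
-- 					changed = True
--
-- 	return {line for line in range(n) if reachable[line]}
-- ===== Notes on version B (the rewrite author's own statement) =====
-- stated objective: alternative
-- what changed: Replaces A's reverse-edge adjacency dict plus worklist-with-set-copies traversal by a worklist-free backward data-flow fixed point: a boolean table over the forward destination array, swept high-to-low until a sweep changes nothing, with the result set read off the table.
import Mathlib
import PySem

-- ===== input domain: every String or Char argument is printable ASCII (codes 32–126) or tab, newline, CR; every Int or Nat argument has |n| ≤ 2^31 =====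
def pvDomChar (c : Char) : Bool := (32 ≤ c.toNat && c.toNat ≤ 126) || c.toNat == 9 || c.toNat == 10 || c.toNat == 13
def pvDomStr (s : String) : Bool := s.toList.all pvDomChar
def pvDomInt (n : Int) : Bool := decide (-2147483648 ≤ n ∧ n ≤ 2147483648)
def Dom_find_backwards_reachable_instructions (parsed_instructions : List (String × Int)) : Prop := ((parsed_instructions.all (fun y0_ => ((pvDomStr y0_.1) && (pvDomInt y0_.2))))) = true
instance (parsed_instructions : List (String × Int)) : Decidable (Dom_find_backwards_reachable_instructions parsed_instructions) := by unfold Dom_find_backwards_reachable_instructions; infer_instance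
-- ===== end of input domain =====

-- B replaces A's reverse-edge dict + worklist traversal by a worklist-free backward
-- data-flow fixed point over the forward destination array (objective: alternative).
-- Both Pythons return a SET (an unordered value); each port returns that set's canonical
-- ascending-list representation, which is exact as a set value.

-- ===== PORT A =====
-- create_reverse_edge_graph: enumerate loop; 'graph[dest] += [line]' after a membership test
def pvRevGraphA (parsed_instructions : List (String × Int)) : PySem.Dict Int (List Int) :=
  (PySem.List.enumerate parsed_instructions).foldl
    (fun d p =>
      let line : Int := p.1
      let dest_line : Int := if p.2.1 == "jmp" then line + p.2.2 else line + 1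
      match d.get? dest_line with
      | some l => d.insert dest_line (l ++ [line])
      | none   => d.insert dest_line [line])
    PySem.Dict.empty

-- A's while loop. `last` carries Python's `next_instrs` variable (its stale value is reused when
-- `active_instr not in reverse_edge_graph`); `none` = variable not yet assigned, where Python
-- raises NameError (those inputs are outside Pre_; the port returns the visited set so far).
-- Fuel length+2 covers every run: each pushed node is a distinct line index of the program,
-- so there are at most length+1 iterations.
def pvLoopA (rev : PySem.Dict Int (List Int)) :
    Nat → List Int → PySem.Set Int → Option (List Int) → List Int
  | 0, _, vis, _ => vis
  | fuel+1, stack, vis, last =>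
    match stack.getLast? with
    | none => vis
    | some x =>
      let rest := stack.dropLast
      match (match rev.get? x with | some l => some l | none => last) with
      | none => vis
      | some next_instrs =>
        let cleaned := PySem.Set.diff (PySem.Set.ofList next_instrs) vis
        pvLoopA rev fuel (rest ++ cleaned) (PySem.Set.union vis cleaned) (some next_instrs)

-- the Python returns the visited SET; the port returns its canonical ascending-list form
def find_backwards_reachable_instructions (parsed_instructions : List (String × Int)) : List Int :=
  PySem.List.sorted
    (pvLoopA (pvRevGraphA parsed_instructions) (parsed_instructions.length + 2)
      [(parsed_instructions.length : Int)] PySem.Set.empty none)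
    (fun x => x) false

-- ===== PORT B =====
-- dests = [line + val if name == 'jmp' else line + 1 for line, (name, val) in enumerate(...)]
def pvDests (parsed_instructions : List (String × Int)) : List Int :=
  (PySem.List.enumerate parsed_instructions).map
    (fun p => if p.2.1 == "jmp" then p.1 + p.2.2 else p.1 + 1)

-- body of 'for line in range(n-1, -1, -1)'; the pyGetD defaults are never used (line and
-- dest are guarded in range), and reachable[line] = True is the in-range pySetD
def pvPassStep (dests : List Int) (n : Int) (st : List Bool × Bool) (line : Int) :
    List Bool × Bool :=
  if PySem.List.pyGetD st.1 line false then st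
  else
    let dest := PySem.List.pyGetD dests line 0
    if dest == n || (decide (0 ≤ dest) && decide (dest < n) && PySem.List.pyGetD st.1 dest false)
    then (PySem.List.pySetD st.1 line true, true)
    else st

-- one sweep of the lines from high to low, carrying (reachable, changed)
def pvSweepPass (dests : List Int) (n : Int) (st : List Bool × Bool) : List Bool × Bool :=
  (PySem.List.pyRange (n - 1) (-1) (-1)).foldl (pvPassStep dests n) st

-- 'while changed:' — each continuing sweep turns at least one False to True, so at most
-- length+1 sweeps run; fuel length+1 covers every run
def pvSweep (dests : List Int) (n : Int) : Nat → List Bool → List Bool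
  | 0, r => r
  | fuel+1, r =>
    let st := pvSweepPass dests n (r, false)
    if st.2 then pvSweep dests n fuel st.1 else st.1

-- the returned set comprehension {line for line in range(n) if reachable[line]} is already
-- in canonical ascending order
def find_backwards_reachable_instructions_alt (parsed_instructions : List (String × Int)) : List Int :=
  let n : Int := parsed_instructions.length
  let dests := pvDests parsed_instructions
  let r := pvSweep dests n (parsed_instructions.length + 1)
    (List.replicate parsed_instructions.length false)
  (PySem.List.pyRange 0 n 1).filter (fun line => PySem.List.pyGetD r line false)

-- ===== PRECONDITION & SPEC =====
-- Pre_ excludes exactly the inputs on which A raises NameError: unless some instruction's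
-- destination (line+val for 'jmp', else line+1) equals len(parsed_instructions), the first loop
-- iteration reads the never-assigned `next_instrs`.
def Pre_find_backwards_reachable_instructions (parsed_instructions : List (String × Int)) : Prop :=
  ∃ i : Fin parsed_instructions.length,
    (if (parsed_instructions.get i).1 = "jmp" then (i : Int) + (parsed_instructions.get i).2
     else (i : Int) + 1) = (parsed_instructions.length : Int)
instance (parsed_instructions : List (String × Int)) : Decidable (Pre_find_backwards_reachable_instructions parsed_instructions) := by unfold Pre_find_backwards_reachable_instructions; infer_instance

def pvWitness_find_backwards_reachable_instructions : (List (String × Int)) := [("jmp", 1)]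

def Spec_find_backwards_reachable_instructions (parsed_instructions : List (String × Int)) (out : List Int) : Prop := out = find_backwards_reachable_instructions_alt parsed_instructions
instance (parsed_instructions : List (String × Int)) (out : List Int) : Decidable (Spec_find_backwards_reachable_instructions parsed_instructions out) := by unfold Spec_find_backwards_reachable_instructions; infer_instance

-- ===== CLAIM (what is proved, stated in full; the proofs are below) =====
def Claim_equal_find_backwards_reachable_instructions : Prop := ∀ (parsed_instructions : List (String × Int)), Dom_find_backwards_reachable_instructions parsed_instructions → Pre_find_backwards_reachable_instructions parsed_instructions → Spec_find_backwards_reachable_instructions parsed_instructions (find_backwards_reachable_instructions parsed_instructions)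

-- ===== LEMMAS AND PROOFS =====

-- the forward destination of line i, and backwards reachability from the program end
def pvDest (pi : List (String × Int)) (i : Nat) : Int :=
  if (pi.getD i ("", 0)).1 = "jmp" then (i : Int) + (pi.getD i ("", 0)).2 else (i : Int) + 1

inductive pvReach : List (String × Int) → Nat → Prop
  | base (pi : List (String × Int)) (i : Nat) (h : i < pi.length)
      (hd : pvDest pi i = (pi.length : Int)) : pvReach pi i
  | step (pi : List (String × Int)) (i j : Nat) (h : i < pi.length) (hj : j < pi.length)
      (hd : pvDest pi i = (j : Int)) (hr : pvReach pi j) : pvReach pi i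

def pvPred (pi : List (String × Int)) (p y : Int) : Prop :=
  ∃ i : Nat, i < pi.length ∧ p = (i : Int) ∧ pvDest pi i = y

-- A's graph builder rewritten with getD (same dict), for the characterization below
def pvRevGraphB (parsed_instructions : List (String × Int)) : PySem.Dict Int (List Int) :=
  (PySem.List.enumerate parsed_instructions).foldl
    (fun d p =>
      let line : Int := p.1
      let dest_line : Int := if p.2.1 == "jmp" then line + p.2.2 else line + 1
      d.insert dest_line (d.getD dest_line [] ++ [line]))
    PySem.Dict.empty

lemma pvGraphs_eq (parsed_instructions : List (String × Int)) :
    pvRevGraphA parsed_instructions = pvRevGraphB parsed_instructions := by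
  unfold pvRevGraphA pvRevGraphB
  apply PySem.List.foldl_congr_mem
  intro d p _
  dsimp only
  split
  next l h => simp only [beq_iff_eq] at h; simp [PySem.Dict.getD, h]
  next h => simp only [beq_iff_eq] at h; simp [PySem.Dict.getD, h]

lemma pvRevB_getD_aux (l : List (Int × (String × Int))) :
    ∀ (d : PySem.Dict Int (List Int)) (k : Int),
    (l.foldl (fun d p =>
        let line : Int := p.1
        let dest_line : Int := if p.2.1 == "jmp" then line + p.2.2 else line + 1
        d.insert dest_line (d.getD dest_line [] ++ [line])) d).getD k []
    = d.getD k []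
      ++ (l.filter (fun p => (if p.2.1 == "jmp" then p.1 + p.2.2 else p.1 + 1) == k)).map (·.1) := by
  induction l with
  | nil => intro d k; simp
  | cons p t ih =>
    intro d k
    rw [List.foldl_cons, ih]
    by_cases h : (if p.2.1 == "jmp" then p.1 + p.2.2 else p.1 + 1) = k
    · rw [PySem.Dict.getD_insert]
      subst h
      simp
    · rw [PySem.Dict.getD_insert, if_neg (fun hk => h hk.symm)]
      simp only [beq_iff_eq] at h
      simp [h]

lemma pvMem_adj (pi : List (String × Int)) (y p : Int) :
    p ∈ (pvRevGraphB pi).getD y [] ↔ pvPred pi p y := by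
  unfold pvRevGraphB
  rw [pvRevB_getD_aux]
  have hempty : (PySem.Dict.empty : PySem.Dict Int (List Int)).getD y [] = [] := by
    simp [PySem.Dict.getD, PySem.Dict.get?, PySem.Dict.empty]
  rw [hempty, List.nil_append]
  simp only [List.mem_map, List.mem_filter, PySem.List.mem_enumerate_iff]
  constructor
  · rintro ⟨q, ⟨⟨k, hk, rfl⟩, hdq⟩, hq1⟩
    refine ⟨k, hk, ?_, ?_⟩
    · simpa using hq1.symm
    · have hgd : pi.getD k ("", 0) = pi[k] := List.getD_eq_getElem pi ("", 0) hk
      simp only [beq_iff_eq] at hdq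
      unfold pvDest
      rw [hgd]
      simpa [beq_iff_eq] using hdq
  · rintro ⟨i, hi, rfl, hd⟩
    refine ⟨((i : Int), pi[i]), ⟨⟨i, hi, by simp⟩, ?_⟩, rfl⟩
    have hgd : pi.getD i ("", 0) = pi[i] := List.getD_eq_getElem pi ("", 0) hi
    unfold pvDest at hd
    rw [hgd] at hd
    simpa [beq_iff_eq] using hd

-- key membership in the built reverse-edge graph (for Pre_)
lemma pvContains_fold (l : List (Int × (String × Int))) :
    ∀ (d : PySem.Dict Int (List Int)) (k : Int),
    ((l.foldl (fun d p =>
        let line : Int := p.1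
        let dest_line : Int := if p.2.1 == "jmp" then line + p.2.2 else line + 1
        d.insert dest_line (d.getD dest_line [] ++ [line])) d).contains k) = true
    ↔ d.contains k = true ∨ ∃ p ∈ l, (if p.2.1 == "jmp" then p.1 + p.2.2 else p.1 + 1) = k := by
  induction l with
  | nil => intro d k; simp
  | cons p t ih =>
    intro d k
    rw [List.foldl_cons, ih]
    rw [PySem.Dict.contains_insert]
    simp only [Bool.or_eq_true, beq_iff_eq, List.mem_cons]
    constructor
    · rintro ((h | h) | h)
      · exact Or.inr ⟨p, Or.inl rfl, h.symm⟩
      · exact Or.inl h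
      · obtain ⟨q, hq, hqk⟩ := h; exact Or.inr ⟨q, Or.inr hq, hqk⟩
    · rintro (h | ⟨q, (rfl | hq), hqk⟩)
      · exact Or.inl (Or.inr h)
      · exact Or.inl (Or.inl hqk.symm)
      · exact Or.inr ⟨q, hq, hqk⟩

lemma pvMem_enumerate (pi : List (String × Int)) : ∀ (s : Int) (i : Nat), i < pi.length →
    ((s + i : Int), pi[i]!) ∈ PySem.List.enumerate pi s := by
  induction pi with
  | nil => intro s i hi; simp at hi
  | cons a t ih =>
    intro s i hi
    cases i with
    | zero => simp [PySem.List.enumerate]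
    | succ j =>
      have hj : j < t.length := by simpa using hi
      have := ih (s + 1) j hj
      simp only [PySem.List.enumerate, List.mem_cons]
      right
      have harith : (s + 1 + (j : Int)) = s + ((j : Nat) + 1 : Nat) := by push_cast; ring
      have hget : (a :: t)[j + 1]! = t[j]! := by simp
      rw [← harith, hget]
      exact this

lemma pvPre_contains (pi : List (String × Int))
    (h : Pre_find_backwards_reachable_instructions pi) :
    ∃ l, (pvRevGraphB pi).get? (pi.length : Int) = some l := by
  obtain ⟨i, hi⟩ := h
  have hmem := pvMem_enumerate pi 0 i.1 i.2
  have hcontains : (pvRevGraphB pi).contains (pi.length : Int) = true := by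
    unfold pvRevGraphB
    rw [pvContains_fold]
    refine Or.inr ⟨((0 + (i.1 : Int)), pi[i.1]!), hmem, ?_⟩
    have hg : pi[i.1]! = pi.get i := by
      rw [List.get_eq_getElem, List.getElem!_eq_getElem?_getD, List.getElem?_eq_getElem i.2]
      rfl
    rw [hg]
    simpa [zero_add, beq_iff_eq] using hi
  have hsome : ((pvRevGraphB pi).get? (pi.length : Int)).isSome = true := by
    simp only [PySem.Dict.get?, PySem.Dict.contains, List.any_eq_true] at hcontains ⊢
    obtain ⟨q, hq, hqk⟩ := hcontains
    simp only [Option.isSome_map]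
    rw [List.find?_isSome]
    exact ⟨q, hq, hqk⟩
  exact Option.isSome_iff_exists.mp hsome

-- the list of fresh nodes one pop appends, in first-occurrence order of the adjacency list
def pvNew : List Int → List Int → List Int
  | _, [] => []
  | vis, y :: t => if vis.contains y then pvNew vis t else y :: pvNew (vis ++ [y]) t

-- the clean in-place DFS that A's loop reduces to (proof-side only)
def pvLoopB (rev : PySem.Dict Int (List Int)) :
    Nat → List Int → PySem.Set Int → List Int
  | 0, _, vis => vis
  | fuel+1, stack, vis =>
    match stack.getLast? with
    | none => vis
    | some x =>
      let st := (rev.getD x []).foldl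
        (fun (s : PySem.Set Int × List Int) y =>
          if s.1.contains y then s else (PySem.Set.add s.1 y, s.2 ++ [y]))
        (vis, stack.dropLast)
      pvLoopB rev fuel st.2 st.1

def pvStepB (s : PySem.Set Int × List Int) (y : Int) : PySem.Set Int × List Int :=
  if s.1.contains y then s else (PySem.Set.add s.1 y, s.2 ++ [y])

lemma pvFoldB_eq (l : List Int) : ∀ (vis acc : List Int),
    l.foldl pvStepB (vis, acc) = (vis ++ pvNew vis l, acc ++ pvNew vis l) := by
  induction l with
  | nil => intro vis acc; simp [pvNew]
  | cons y t ih =>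
    intro vis acc
    rw [List.foldl_cons]
    by_cases h : y ∈ vis
    · have hs : pvStepB (vis, acc) y = (vis, acc) := by simp [pvStepB, h]
      have hn : pvNew vis (y :: t) = pvNew vis t := by simp [pvNew, h]
      rw [hs, hn, ih]
    · have hs : pvStepB (vis, acc) y = (vis ++ [y], acc ++ [y]) := by
        simp [pvStepB, PySem.Set.add, h]
      have hn : pvNew vis (y :: t) = y :: pvNew (vis ++ [y]) t := by simp [pvNew, h]
      rw [hs, hn, ih]
      simp

lemma pvDiff_foldl_add (l : List Int) : ∀ (s vis : List Int),
    PySem.Set.diff (l.foldl PySem.Set.add s) vis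
    = PySem.Set.diff s vis ++ pvNew (vis ++ PySem.Set.diff s vis) l := by
  induction l with
  | nil => intro s vis; simp [pvNew]
  | cons y t ih =>
    intro s vis
    rw [List.foldl_cons]
    by_cases hv : y ∈ vis
    · have hb : pvNew (vis ++ PySem.Set.diff s vis) (y :: t)
          = pvNew (vis ++ PySem.Set.diff s vis) t := by simp [pvNew, hv]
      by_cases hy : y ∈ s
      · have ha : PySem.Set.add s y = s := by simp [PySem.Set.add, hy]
        rw [ha, ih, hb]
      · have ha : PySem.Set.add s y = s ++ [y] := by simp [PySem.Set.add, hy]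
        have hd : PySem.Set.diff (s ++ [y]) vis = PySem.Set.diff s vis := by
          simp [PySem.Set.diff, List.filter_append, hv]
        rw [ha, ih, hd, hb]
    · by_cases hy : y ∈ s
      · have ha : PySem.Set.add s y = s := by simp [PySem.Set.add, hy]
        have hb : pvNew (vis ++ PySem.Set.diff s vis) (y :: t)
            = pvNew (vis ++ PySem.Set.diff s vis) t := by
          have : y ∈ vis ++ PySem.Set.diff s vis := by
            simp [PySem.Set.diff, List.mem_filter, hy, hv]
          simp [pvNew, this]
        rw [ha, ih, hb]
      · have ha : PySem.Set.add s y = s ++ [y] := by simp [PySem.Set.add, hy]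
        have hd : PySem.Set.diff (s ++ [y]) vis = PySem.Set.diff s vis ++ [y] := by
          simp [PySem.Set.diff, List.filter_append, hv]
        have hb : pvNew (vis ++ PySem.Set.diff s vis) (y :: t)
            = y :: pvNew (vis ++ PySem.Set.diff s vis ++ [y]) t := by
          have : ¬ y ∈ vis ++ PySem.Set.diff s vis := by
            simp [PySem.Set.diff, List.mem_filter, hv, hy]
          simp [pvNew, this, List.append_assoc]
        rw [ha, ih, hd, hb]
        simp

lemma pvCleaned_eq (l vis : List Int) :
    PySem.Set.diff (PySem.Set.ofList l) vis = pvNew vis l := by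
  have h := pvDiff_foldl_add l [] vis
  simpa [PySem.Set.ofList, PySem.Set.empty, PySem.Set.diff] using h

lemma pvUnion_new (l : List Int) : ∀ vis : List Int,
    PySem.Set.union vis (pvNew vis l) = vis ++ pvNew vis l := by
  induction l with
  | nil => intro vis; simp [pvNew, PySem.Set.union, PySem.Set.update]
  | cons y t ih =>
    intro vis
    by_cases h : y ∈ vis
    · have hn : pvNew vis (y :: t) = pvNew vis t := by simp [pvNew, h]
      rw [hn, ih]
    · have hn : pvNew vis (y :: t) = y :: pvNew (vis ++ [y]) t := by simp [pvNew, h]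
      have ha : PySem.Set.add vis y = vis ++ [y] := by simp [PySem.Set.add, h]
      have hu : PySem.Set.union vis (y :: pvNew (vis ++ [y]) t)
          = PySem.Set.union (vis ++ [y]) (pvNew (vis ++ [y]) t) := by
        simp [PySem.Set.union, PySem.Set.update, ha]
      rw [hn, hu, ih]
      simp

lemma pvMem_new (l : List Int) : ∀ (vis : List Int), ∀ y ∈ l, y ∈ vis ++ pvNew vis l := by
  induction l with
  | nil => intro vis y hy; cases hy
  | cons z t ih =>
    intro vis y hy
    by_cases h : z ∈ vis
    · have hn : pvNew vis (z :: t) = pvNew vis t := by simp [pvNew, h]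
      rw [hn]
      rcases List.mem_cons.mp hy with rfl | hy
      · simp [h]
      · exact ih vis y hy
    · have hn : pvNew vis (z :: t) = z :: pvNew (vis ++ [z]) t := by simp [pvNew, h]
      rw [hn]
      rcases List.mem_cons.mp hy with rfl | hy
      · simp
      · have := ih (vis ++ [z]) y hy
        simp only [List.mem_append, List.mem_cons] at this ⊢
        tauto

lemma pvNew_nil_of_subset (l : List Int) : ∀ vis : List Int,
    (∀ y ∈ l, y ∈ vis) → pvNew vis l = [] := by
  induction l with
  | nil => intro vis _; rfl
  | cons y t ih =>
    intro vis h
    have hy : y ∈ vis := h y (by simp)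
    have hn : pvNew vis (y :: t) = pvNew vis t := by simp [pvNew, hy]
    rw [hn]
    exact ih vis (fun z hz => h z (by simp [hz]))

-- fresh nodes come from the adjacency list and were not yet visited
lemma pvNew_subset (l : List Int) : ∀ vis y, y ∈ pvNew vis l → y ∈ l ∧ y ∉ vis := by
  induction l with
  | nil => intro vis y h; simp [pvNew] at h
  | cons z t ih =>
    intro vis y h
    by_cases hz : z ∈ vis
    · rw [show pvNew vis (z :: t) = pvNew vis t from by simp [pvNew, hz]] at h
      obtain ⟨h1, h2⟩ := ih vis y h
      exact ⟨List.mem_cons_of_mem _ h1, h2⟩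
    · rw [show pvNew vis (z :: t) = z :: pvNew (vis ++ [z]) t from by simp [pvNew, hz]] at h
      rcases List.mem_cons.mp h with rfl | h
      · exact ⟨List.mem_cons_self .., hz⟩
      · obtain ⟨h1, h2⟩ := ih (vis ++ [z]) y h
        exact ⟨List.mem_cons_of_mem _ h1, fun hv => h2 (by simp [hv])⟩

lemma pvNew_append_nodup (l : List Int) : ∀ vis : List Int,
    vis.Nodup → (vis ++ pvNew vis l).Nodup := by
  induction l with
  | nil => intro vis h; simpa [pvNew]
  | cons z t ih =>
    intro vis hnd
    by_cases hz : z ∈ vis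
    · rw [show pvNew vis (z :: t) = pvNew vis t from by simp [pvNew, hz]]
      exact ih vis hnd
    · rw [show pvNew vis (z :: t) = z :: pvNew (vis ++ [z]) t from by simp [pvNew, hz]]
      have h2 := ih (vis ++ [z])
        (by simp [List.nodup_append, hnd]
            exact fun a ha h => hz (h ▸ ha))
      rw [show vis ++ z :: pvNew (vis ++ [z]) t
            = (vis ++ [z]) ++ pvNew (vis ++ [z]) t from by simp]
      exact h2

-- A's loop (with the stale next_instrs variable) equals the clean DFS
lemma pvLoop_eq (rev : PySem.Dict Int (List Int)) : ∀ (fuel : Nat) (stack vis last : List Int),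
    (∀ y ∈ last, y ∈ vis) →
    pvLoopA rev fuel stack vis (some last) = pvLoopB rev fuel stack vis := by
  intro fuel
  induction fuel with
  | zero => intro stack vis last _; rfl
  | succ f ih =>
    intro stack vis last hlast
    cases hst : stack.getLast? with
    | none => simp [pvLoopA, pvLoopB, hst]
    | some x =>
      cases hx : rev.get? x with
      | some l =>
        have hgd : rev.getD x [] = l := by simp [PySem.Dict.getD, hx]
        have hfold : l.foldl
            (fun (s : PySem.Set Int × List Int) y =>
              if s.1.contains y then s else (PySem.Set.add s.1 y, s.2 ++ [y]))
            (vis, stack.dropLast)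
            = (vis ++ pvNew vis l, stack.dropLast ++ pvNew vis l) :=
          pvFoldB_eq l vis stack.dropLast
        simp only [pvLoopA, pvLoopB, hst, hx, hgd, hfold, pvCleaned_eq, pvUnion_new]
        exact ih _ _ l (pvMem_new l vis)
      | none =>
        have hgd : rev.getD x [] = [] := by simp [PySem.Dict.getD, hx]
        have hnil : pvNew vis last = [] := pvNew_nil_of_subset last vis hlast
        simp only [pvLoopA, pvLoopB, hst, hx, hgd, pvCleaned_eq, hnil,
          List.append_nil, List.foldl_nil]
        exact ih _ _ last hlast

-- the first iteration, unrolled on both sides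
lemma pvLoopA_start (rev : PySem.Dict Int (List Int)) (f : Nat) (x : Int) (l : List Int)
    (hl : rev.get? x = some l) :
    pvLoopA rev (f+1) [x] PySem.Set.empty none
    = pvLoopA rev f (pvNew [] l) (pvNew [] l) (some l) := by
  have h1 := pvCleaned_eq l []
  have h2 := pvUnion_new l []
  simp only [pvLoopA, List.getLast?_singleton, hl, PySem.Set.empty] at *
  simp [h1, h2]

-- closure of the visited set gives completeness
lemma pvReach_subset_closed_vis (pi : List (String × Int)) (vis : List Int)
    (hcl : ∀ y, (y = (pi.length : Int) ∨ y ∈ vis) → ∀ p, pvPred pi p y → p ∈ vis) :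
    ∀ i : Nat, pvReach pi i → ((i : Int) ∈ vis) := by
  intro i hi
  induction hi with
  | base i h hd => exact hcl _ (Or.inl rfl) _ ⟨i, h, rfl, hd⟩
  | step i j h hj hd hr ih => exact hcl _ (Or.inr ih) _ ⟨i, h, rfl, hd⟩

-- nodup lists of line indices have length ≤ n
lemma pvLen_le (pi : List (String × Int)) (vis : List Int) (hnd : vis.Nodup)
    (hform : ∀ v ∈ vis, ∃ i : Nat, i < pi.length ∧ v = (i : Int) ∧ True) :
    vis.length ≤ pi.length := by
  have hsub : vis ⊆ List.map (fun i => Int.ofNat i) (List.range pi.length) := by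
    intro v hv
    obtain ⟨i, hi, rfl, -⟩ := hform v hv
    exact List.mem_map_of_mem (List.mem_range.mpr hi)
  have := (List.subperm_of_subset hnd hsub).length_le
  simpa using this

-- the DFS invariant: sound, complete and duplicate-free on termination
lemma pvDFS_main (pi : List (String × Int)) : ∀ (fuel : Nat) (stack vis : List Int),
    stack.length + (pi.length - vis.length) < fuel →
    (∀ x ∈ stack, x = (pi.length : Int) ∨ x ∈ vis) →
    (∀ v ∈ vis, ∃ i : Nat, i < pi.length ∧ v = (i : Int) ∧ pvReach pi i) →
    (∀ y, (y = (pi.length : Int) ∨ y ∈ vis) → y ∈ stack ∨ ∀ p, pvPred pi p y → p ∈ vis) →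
    vis.Nodup →
    ((∀ v ∈ pvLoopB (pvRevGraphB pi) fuel stack vis,
        ∃ i : Nat, i < pi.length ∧ v = (i : Int) ∧ pvReach pi i) ∧
     (∀ i : Nat, pvReach pi i → ((i : Int) ∈ pvLoopB (pvRevGraphB pi) fuel stack vis)) ∧
     (pvLoopB (pvRevGraphB pi) fuel stack vis).Nodup) := by
  intro fuel
  induction fuel with
  | zero =>
    intro stack vis hfuel _ _ _ _
    exact absurd hfuel (by omega)
  | succ f ih =>
    intro stack vis hfuel hstack hvisR hclosed hnd
    rcases hst : stack.getLast? with _ | x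
    · have hsempty : stack = [] := List.getLast?_eq_none_iff.mp hst
      have hret : pvLoopB (pvRevGraphB pi) (f+1) stack vis = vis := by
        simp [pvLoopB, hst]
      rw [hret]
      refine ⟨hvisR, ?_, hnd⟩
      apply pvReach_subset_closed_vis pi vis
      intro y hy p hp
      rcases hclosed y hy with hyin | hcl2
      · rw [hsempty] at hyin; cases hyin
      · exact hcl2 p hp
    · obtain ⟨rest, rfl⟩ := List.getLast?_eq_some_iff.mp hst
      have hdrop : (rest ++ [x]).dropLast = rest := by simp
      have hfold := pvFoldB_eq ((pvRevGraphB pi).getD x []) vis rest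
      have hloop : pvLoopB (pvRevGraphB pi) (f+1) (rest ++ [x]) vis
          = pvLoopB (pvRevGraphB pi) f (rest ++ pvNew vis ((pvRevGraphB pi).getD x []))
              (vis ++ pvNew vis ((pvRevGraphB pi).getD x [])) := by
        simp only [pvLoopB, hst, hdrop]
        rw [show (fun (s : PySem.Set Int × List Int) y =>
              if s.1.contains y then s else (PySem.Set.add s.1 y, s.2 ++ [y])) = pvStepB
            from rfl, hfold]
      rw [hloop]
      have hfresh := pvNew_subset ((pvRevGraphB pi).getD x []) vis
      have hxdisc : x = (pi.length : Int) ∨ x ∈ vis := hstack x (by simp)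
      have hvisR' : ∀ v ∈ vis ++ pvNew vis ((pvRevGraphB pi).getD x []),
          ∃ i, i < pi.length ∧ v = (i : Int) ∧ pvReach pi i := by
        intro v hv
        rcases List.mem_append.mp hv with hv | hv
        · exact hvisR v hv
        · have hva := (hfresh v hv).1
          obtain ⟨i, hi, rfl, hd⟩ := (pvMem_adj pi x v).mp hva
          refine ⟨i, hi, rfl, ?_⟩
          rcases hxdisc with rfl | hvx
          · exact pvReach.base pi i hi hd
          · obtain ⟨j, hj, hxj, hrj⟩ := hvisR x hvx
            rw [hxj] at hd
            exact pvReach.step pi i j hi hj hd hrj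
      have hnd' := pvNew_append_nodup ((pvRevGraphB pi).getD x []) vis hnd
      have hlen' : (vis ++ pvNew vis ((pvRevGraphB pi).getD x [])).length ≤ pi.length :=
        pvLen_le pi _ hnd' (fun v hv => (hvisR' v hv).imp (fun i h => ⟨h.1, h.2.1, trivial⟩))
      have hfuel' : (rest ++ pvNew vis ((pvRevGraphB pi).getD x [])).length
          + (pi.length - (vis ++ pvNew vis ((pvRevGraphB pi).getD x [])).length) < f := by
        simp only [List.length_append] at hfuel hlen' ⊢
        simp only [List.length_singleton] at hfuel
        omega
      have hstack' : ∀ y ∈ rest ++ pvNew vis ((pvRevGraphB pi).getD x []),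
          y = (pi.length : Int) ∨ y ∈ vis ++ pvNew vis ((pvRevGraphB pi).getD x []) := by
        intro y hy
        rcases List.mem_append.mp hy with hy | hy
        · rcases hstack y (by simp [hy]) with h | h
          · exact Or.inl h
          · exact Or.inr (by simp [h])
        · exact Or.inr (by simp [hy])
      have hclosed' : ∀ y, (y = (pi.length : Int) ∨ y ∈ vis ++ pvNew vis ((pvRevGraphB pi).getD x [])) →
          y ∈ rest ++ pvNew vis ((pvRevGraphB pi).getD x [])
          ∨ ∀ p, pvPred pi p y → p ∈ vis ++ pvNew vis ((pvRevGraphB pi).getD x []) := by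
        intro y hy
        by_cases hyx : y = x
        · subst hyx
          right
          intro p hp
          exact pvMem_new ((pvRevGraphB pi).getD y []) vis p ((pvMem_adj pi y p).mpr hp)
        · rcases hy with h | h
          · rcases hclosed y (Or.inl h) with hin | hcl2
            · rcases List.mem_append.mp hin with hin | hin
              · exact Or.inl (List.mem_append_left _ hin)
              · exact absurd (List.mem_singleton.mp hin) hyx
            · exact Or.inr (fun p hp => List.mem_append_left _ (hcl2 p hp))
          · rcases List.mem_append.mp h with h | h
            · rcases hclosed y (Or.inr h) with hin | hcl2
              · rcases List.mem_append.mp hin with hin | hin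
                · exact Or.inl (List.mem_append_left _ hin)
                · exact absurd (List.mem_singleton.mp hin) hyx
              · exact Or.inr (fun p hp => List.mem_append_left _ (hcl2 p hp))
            · exact Or.inl (List.mem_append_right _ h)
      exact ih _ _ hfuel' hstack' hvisR' hclosed' hnd'

-- ===== sweep (B) side =====

def pvGetB (r : List Bool) (j : Nat) : Bool := r.getD j false

def pvSound (pi : List (String × Int)) (r : List Bool) : Prop :=
  ∀ j : Nat, j < pi.length → pvGetB r j = true → pvReach pi j

lemma pvGetB_zero (a : Bool) (t : List Bool) : pvGetB (a :: t) 0 = a := rfl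

lemma pvGetB_succ (a : Bool) (t : List Bool) (j : Nat) : pvGetB (a :: t) (j+1) = pvGetB t j := by
  simp [pvGetB]

lemma pvGetB_eq (r : List Bool) (k : Nat) (hk : k < r.length) : pvGetB r k = r[k] := by
  unfold pvGetB
  rw [List.getD_eq_getElem?_getD, List.getElem?_eq_getElem hk]
  rfl

lemma pvGetB_pyGetD (r : List Bool) (x : Int) (h0 : 0 ≤ x) (h1 : x < (r.length : Int)) :
    PySem.List.pyGetD r x false = pvGetB r x.toNat := by
  have hk : x.toNat < r.length := by omega
  rw [PySem.List.pyGetD_eq_getElem r false h0 h1, pvGetB_eq r x.toNat hk]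

lemma pvGetB_set (r : List Bool) (k : Nat) (hk : k < r.length) (j : Nat) :
    pvGetB (r.set k true) j = if j = k then true else pvGetB r j := by
  unfold pvGetB
  rw [List.getD_eq_getElem?_getD, List.getD_eq_getElem?_getD, List.getElem?_set]
  by_cases h : j = k
  · subst h; simp [hk]
  · rw [if_neg (fun hh : k = j => h hh.symm), if_neg h]

lemma pvDests_getD (pi : List (String × Int)) (j : Nat) (hj : j < pi.length) :
    PySem.List.pyGetD (pvDests pi) (j : Int) 0 = pvDest pi j := by
  unfold pvDests
  rw [PySem.List.enumerate_eq_map_pyRange pi ("", 0), List.map_map]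
  have hlen : PySem.List.len pi = ((pi.length : Nat) : Int) := by simp
  rw [hlen, PySem.List.pyGetD_map_pyRange _ pi.length j 0 hj]
  simp only [Function.comp, PySem.List.pyGetD_natCast]
  have hgd : pi.getD j ("", 0) = pi[j] := List.getD_eq_getElem pi ("", 0) hj
  unfold pvDest
  rw [hgd]
  by_cases h : (pi[j].1 = "jmp") <;> simp [h]

-- the sweep's condition, read through pvDest
lemma pvCondB (pi : List (String × Int)) (r : List Bool) (hr : r.length = pi.length)
    (j : Nat) (hj : j < pi.length) :
    ((PySem.List.pyGetD (pvDests pi) ((j : Int)) 0 == (pi.length : Int))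
      || (decide (0 ≤ PySem.List.pyGetD (pvDests pi) ((j : Int)) 0)
          && decide (PySem.List.pyGetD (pvDests pi) ((j : Int)) 0 < (pi.length : Int))
          && PySem.List.pyGetD r (PySem.List.pyGetD (pvDests pi) ((j : Int)) 0) false)) = true
    ↔ (pvDest pi j = (pi.length : Int)
       ∨ ∃ k : Nat, k < pi.length ∧ pvDest pi j = (k : Int) ∧ pvGetB r k = true) := by
  rw [pvDests_getD pi j hj]
  by_cases h1 : pvDest pi j = (pi.length : Int)
  · simp [h1]
  · have h1b : (pvDest pi j == (pi.length : Int)) = false := by simpa using h1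
    rw [h1b]
    simp only [Bool.false_or, Bool.and_eq_true, decide_eq_true_eq]
    constructor
    · rintro ⟨⟨hge, hlt⟩, hget⟩
      have hlt' : pvDest pi j < (r.length : Int) := by rw [hr]; exact hlt
      rw [pvGetB_pyGetD r _ hge hlt'] at hget
      exact Or.inr ⟨(pvDest pi j).toNat, by omega, (Int.toNat_of_nonneg hge).symm, hget⟩
    · rintro (h | ⟨k, hk, hdk, hgb⟩)
      · exact absurd h h1
      · have hge : (0 : Int) ≤ pvDest pi j := by omega
        have hlt : pvDest pi j < (pi.length : Int) := by omega
        have hlt' : pvDest pi j < (r.length : Int) := by rw [hr]; exact hlt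
        refine ⟨⟨hge, hlt⟩, ?_⟩
        rw [pvGetB_pyGetD r _ hge hlt']
        have : (pvDest pi j).toNat = k := by omega
        rw [this]; exact hgb

-- one pass: length kept, pointwise monotone, sound, and the changed flag is honest
lemma pvPass_fold (pi : List (String × Int)) :
    ∀ (L : List Int), (∀ x ∈ L, 0 ≤ x ∧ x < (pi.length : Int)) →
    ∀ (r : List Bool) (c : Bool), r.length = pi.length →
    ((L.foldl (pvPassStep (pvDests pi) (pi.length : Int)) (r, c)).1.length = pi.length ∧
     (∀ j, pvGetB r j = true →
        pvGetB (L.foldl (pvPassStep (pvDests pi) (pi.length : Int)) (r, c)).1 j = true) ∧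
     (pvSound pi r → pvSound pi (L.foldl (pvPassStep (pvDests pi) (pi.length : Int)) (r, c)).1) ∧
     ((L.foldl (pvPassStep (pvDests pi) (pi.length : Int)) (r, c)).2 = false →
        (L.foldl (pvPassStep (pvDests pi) (pi.length : Int)) (r, c)).1 = r) ∧
     (c = true → (L.foldl (pvPassStep (pvDests pi) (pi.length : Int)) (r, c)).2 = true) ∧
     (c = false → (L.foldl (pvPassStep (pvDests pi) (pi.length : Int)) (r, c)).2 = true →
        (L.foldl (pvPassStep (pvDests pi) (pi.length : Int)) (r, c)).1 ≠ r)) := by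
  intro L
  induction L with
  | nil =>
    intro _ r c hlen
    refine ⟨hlen, fun j h => h, fun h => h, fun _ => rfl, fun h => by simpa using h, ?_⟩
    intro hc hflag
    exfalso
    rw [List.foldl_nil] at hflag
    simp [hc] at hflag
  | cons x T ih =>
    intro hL r c hlen
    have hx := hL x (List.mem_cons_self ..)
    have hT : ∀ y ∈ T, 0 ≤ y ∧ y < (pi.length : Int) :=
      fun y hy => hL y (List.mem_cons_of_mem x hy)
    have hkx : x = ((x.toNat : Nat) : Int) := (Int.toNat_of_nonneg hx.1).symm
    have hkn : x.toNat < pi.length := by omega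
    have hkr : x.toNat < r.length := by omega
    rw [List.foldl_cons]
    by_cases hgot : PySem.List.pyGetD r x false = true
    · have hstep : pvPassStep (pvDests pi) (pi.length : Int) (r, c) x = (r, c) := by
        simp [pvPassStep, hgot]
      rw [hstep]
      exact ih hT r c hlen
    · have hgotB : pvGetB r x.toNat = false := by
        have hh := pvGetB_pyGetD r x hx.1 (by rw [hlen]; exact hx.2)
        rw [hh] at hgot
        exact Bool.eq_false_iff.mpr hgot
      by_cases hcond : ((PySem.List.pyGetD (pvDests pi) x 0 == (pi.length : Int))
          || (decide (0 ≤ PySem.List.pyGetD (pvDests pi) x 0)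
              && decide (PySem.List.pyGetD (pvDests pi) x 0 < (pi.length : Int))
              && PySem.List.pyGetD r (PySem.List.pyGetD (pvDests pi) x 0) false)) = true
      · have hstep : pvPassStep (pvDests pi) (pi.length : Int) (r, c) x
            = (r.set x.toNat true, true) := by
          simp only [pvPassStep]
          rw [if_neg hgot, if_pos hcond, PySem.List.pySetD_of_nonneg r true hx.1]
        rw [hstep]
        have hr1len : (r.set x.toNat true).length = pi.length := by simp [hlen]
        have H := ih hT (r.set x.toNat true) true hr1len
        have hmono1 : ∀ j, pvGetB r j = true → pvGetB (r.set x.toNat true) j = true := by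
          intro j hj
          rw [pvGetB_set r x.toNat hkr j]
          by_cases h : j = x.toNat
          · simp [h]
          · simpa [h] using hj
        refine ⟨H.1, ?_, ?_, ?_, fun _ => H.2.2.2.2.1 rfl, ?_⟩
        · exact fun j hj => H.2.1 j (hmono1 j hj)
        · intro hs
          apply H.2.2.1
          intro j hjn hjtrue
          rw [pvGetB_set r x.toNat hkr j] at hjtrue
          by_cases h : j = x.toNat
          · subst h
            rw [hkx] at hcond
            rcases (pvCondB pi r hlen x.toNat hkn).mp hcond with hdn | ⟨m, hm, hdm, hgm⟩
            · exact pvReach.base pi x.toNat hkn hdn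
            · exact pvReach.step pi x.toNat m hkn hm hdm (hs m hm hgm)
          · exact hs j hjn (by simpa [h] using hjtrue)
        · intro hflag
          exact absurd (H.2.2.2.2.1 rfl) (by simp [hflag])
        · intro _ _
          have hx1 : pvGetB (r.set x.toNat true) x.toNat = true := by
            rw [pvGetB_set r x.toNat hkr]; simp
          have hfin := H.2.1 x.toNat hx1
          intro heq
          rw [heq] at hfin
          rw [hfin] at hgotB
          exact absurd hgotB (by simp)
      · have hstep : pvPassStep (pvDests pi) (pi.length : Int) (r, c) x = (r, c) := by
          simp only [pvPassStep]
          rw [if_neg hgot, if_neg hcond]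
        rw [hstep]
        exact ih hT r c hlen

-- a pass that reports no change really changed nothing, line by line
lemma pvPass_nochange (pi : List (String × Int)) :
    ∀ (L : List Int), (∀ x ∈ L, 0 ≤ x ∧ x < (pi.length : Int)) →
    ∀ (r : List Bool), r.length = pi.length →
    (L.foldl (pvPassStep (pvDests pi) (pi.length : Int)) (r, false)).2 = false →
    ∀ x ∈ L, PySem.List.pyGetD r x false = true ∨
      ((PySem.List.pyGetD (pvDests pi) x 0 == (pi.length : Int))
        || (decide (0 ≤ PySem.List.pyGetD (pvDests pi) x 0)
            && decide (PySem.List.pyGetD (pvDests pi) x 0 < (pi.length : Int))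
            && PySem.List.pyGetD r (PySem.List.pyGetD (pvDests pi) x 0) false)) = false := by
  intro L
  induction L with
  | nil => intro _ r _ _ x hx; cases hx
  | cons z T ih =>
    intro hL r hlen hflag x hx
    have hz := hL z (List.mem_cons_self ..)
    have hT : ∀ y ∈ T, 0 ≤ y ∧ y < (pi.length : Int) :=
      fun y hy => hL y (List.mem_cons_of_mem z hy)
    rw [List.foldl_cons] at hflag
    by_cases hgot : PySem.List.pyGetD r z false = true
    · have hstep : pvPassStep (pvDests pi) (pi.length : Int) (r, false) z = (r, false) := by
        simp [pvPassStep, hgot]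
      rw [hstep] at hflag
      rcases List.mem_cons.mp hx with rfl | hx
      · exact Or.inl hgot
      · exact ih hT r hlen hflag x hx
    · by_cases hcond : ((PySem.List.pyGetD (pvDests pi) z 0 == (pi.length : Int))
          || (decide (0 ≤ PySem.List.pyGetD (pvDests pi) z 0)
              && decide (PySem.List.pyGetD (pvDests pi) z 0 < (pi.length : Int))
              && PySem.List.pyGetD r (PySem.List.pyGetD (pvDests pi) z 0) false)) = true
      · exfalso
        have hstep : pvPassStep (pvDests pi) (pi.length : Int) (r, false) z
            = (r.set z.toNat true, true) := by
          simp only [pvPassStep]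
          rw [if_neg hgot, if_pos hcond, PySem.List.pySetD_of_nonneg r true hz.1]
        rw [hstep] at hflag
        have H := pvPass_fold pi T hT (r.set z.toNat true) true (by simp [hlen])
        exact absurd (H.2.2.2.2.1 rfl) (by simp [hflag])
      · have hstep : pvPassStep (pvDests pi) (pi.length : Int) (r, false) z = (r, false) := by
          simp only [pvPassStep]
          rw [if_neg hgot, if_neg hcond]
        rw [hstep] at hflag
        rcases List.mem_cons.mp hx with rfl | hx
        · exact Or.inr (Bool.eq_false_iff.mpr hcond)
        · exact ih hT r hlen hflag x hx

lemma pvReach_subset_closed (pi : List (String × Int)) (r : List Bool)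
    (hcl : ∀ j : Nat, j < pi.length →
      (pvDest pi j = (pi.length : Int)
        ∨ ∃ k : Nat, k < pi.length ∧ pvDest pi j = (k : Int) ∧ pvGetB r k = true) →
      pvGetB r j = true) :
    ∀ i : Nat, pvReach pi i → pvGetB r i = true := by
  intro i hi
  induction hi with
  | base i h hd => exact hcl i h (Or.inl hd)
  | step i j h hj hd hr ih => exact hcl i h (Or.inr ⟨j, hj, hd, ih⟩)

lemma pvCount_mono (r : List Bool) : ∀ (r' : List Bool), r.length = r'.length →
    (∀ j, pvGetB r j = true → pvGetB r' j = true) → r.count true ≤ r'.count true := by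
  induction r with
  | nil => intro r' _ _; simp
  | cons a t ih =>
    intro r' hlen hm
    cases r' with
    | nil => simp at hlen
    | cons b t' =>
      have hht : t.length = t'.length := by simpa using hlen
      have hmt : ∀ j, pvGetB t j = true → pvGetB t' j = true := by
        intro j hj
        have := hm (j+1) (by rw [pvGetB_succ]; exact hj)
        rwa [pvGetB_succ] at this
      have hh : a = true → b = true := by
        intro h
        have := hm 0 (by rw [pvGetB_zero]; exact h)
        rwa [pvGetB_zero] at this
      have ht := ih t' hht hmt
      cases a with
      | false =>
        cases b with
        | false => simp only [List.count_cons]; simp; omega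
        | true => simp only [List.count_cons]; simp; omega
      | true =>
        have hb := hh rfl; subst hb
        simp only [List.count_cons]; simp; omega

lemma pvCount_strict (r : List Bool) : ∀ (r' : List Bool), r.length = r'.length →
    (∀ j, pvGetB r j = true → pvGetB r' j = true) → r' ≠ r →
    r.count true < r'.count true := by
  induction r with
  | nil => intro r' hlen _ hne; exact absurd (List.length_eq_zero_iff.mp hlen.symm) hne
  | cons a t ih =>
    intro r' hlen hm hne
    cases r' with
    | nil => simp at hlen
    | cons b t' =>
      have hht : t.length = t'.length := by simpa using hlen
      have hmt : ∀ j, pvGetB t j = true → pvGetB t' j = true := by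
        intro j hj
        have := hm (j+1) (by rw [pvGetB_succ]; exact hj)
        rwa [pvGetB_succ] at this
      have hh : a = true → b = true := by
        intro h
        have := hm 0 (by rw [pvGetB_zero]; exact h)
        rwa [pvGetB_zero] at this
      have hmono := pvCount_mono t t' hht hmt
      by_cases hab : b = a
      · subst hab
        have hnet : t' ≠ t := fun h => hne (by rw [h])
        have := ih t' hht hmt hnet
        simp only [List.count_cons]
        omega
      · cases a with
        | true => exact absurd (hh rfl) (by simpa using Ne.symm hab)
        | false =>
          have hb : b = true := by cases b <;> simp_all
          subst hb
          simp only [List.count_cons]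
          simp
          omega

-- the sweep reaches the closed fixed point: sound and complete
lemma pvSweep_main (pi : List (String × Int)) : ∀ (fuel : Nat) (r : List Bool),
    r.length = pi.length → pvSound pi r →
    pi.length + 1 ≤ fuel + r.count true →
    (pvSound pi (pvSweep (pvDests pi) (pi.length : Int) fuel r) ∧
     (∀ i : Nat, pvReach pi i →
        pvGetB (pvSweep (pvDests pi) (pi.length : Int) fuel r) i = true) ∧
     (pvSweep (pvDests pi) (pi.length : Int) fuel r).length = pi.length) := by
  intro fuel
  induction fuel with
  | zero =>
    intro r hlen hsound hcount
    exfalso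
    have hc := List.count_le_length (a := true) (l := r)
    omega
  | succ f ih =>
    intro r hlen hsound hcount
    have hLb : ∀ x ∈ PySem.List.pyRange ((pi.length : Int) - 1) (-1) (-1),
        0 ≤ x ∧ x < (pi.length : Int) := by
      intro x hx
      rw [PySem.List.mem_pyRange_neg_one] at hx
      omega
    have H := pvPass_fold pi _ hLb r false hlen
    simp only [pvSweep, pvSweepPass]
    by_cases hflag : ((PySem.List.pyRange ((pi.length : Int) - 1) (-1) (-1)).foldl
        (pvPassStep (pvDests pi) (pi.length : Int)) (r, false)).2 = true
    · rw [if_pos hflag]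
      have hne := H.2.2.2.2.2 rfl hflag
      have hstrict := pvCount_strict r _ (by rw [hlen, H.1]) H.2.1 hne
      exact ih _ H.1 (H.2.2.1 hsound) (by omega)
    · rw [if_neg hflag]
      have hflag' : ((PySem.List.pyRange ((pi.length : Int) - 1) (-1) (-1)).foldl
          (pvPassStep (pvDests pi) (pi.length : Int)) (r, false)).2 = false :=
        Bool.eq_false_iff.mpr hflag
      rw [H.2.2.2.1 hflag']
      refine ⟨hsound, ?_, hlen⟩
      apply pvReach_subset_closed pi r
      intro j hjn hant
      have hjL : ((j : Nat) : Int) ∈ PySem.List.pyRange ((pi.length : Int) - 1) (-1) (-1) := by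
        rw [PySem.List.mem_pyRange_neg_one]
        constructor <;> omega
      rcases pvPass_nochange pi _ hLb r hlen hflag' ((j : Nat) : Int) hjL with hleft | hright
      · have hh := pvGetB_pyGetD r ((j : Nat) : Int) (by omega)
          (by rw [hlen]; exact_mod_cast hjn)
        rw [hh] at hleft
        simpa using hleft
      · exfalso
        have hc := (pvCondB pi r hlen j hjn).mpr hant
        rw [hright] at hc
        cases hc

-- ===== VERDICT (by name: the statement is the Claim_ definition above) =====
theorem find_backwards_reachable_instructions_spec : Claim_equal_find_backwards_reachable_instructions := by
  intro pi _dom hpre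
  unfold Spec_find_backwards_reachable_instructions
  unfold find_backwards_reachable_instructions find_backwards_reachable_instructions_alt
  rw [pvGraphs_eq]
  obtain ⟨l, hl⟩ := pvPre_contains pi hpre
  have hstartA : pvLoopA (pvRevGraphB pi) (pi.length + 2) [(pi.length : Int)] PySem.Set.empty none
      = pvLoopB (pvRevGraphB pi) (pi.length + 1) (pvNew [] l) (pvNew [] l) := by
    rw [show pi.length + 2 = (pi.length + 1) + 1 from rfl]
    rw [pvLoopA_start _ _ _ _ hl]
    exact pvLoop_eq _ _ _ _ l (by simpa using pvMem_new l [])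
  rw [hstartA]
  have hgdl : (pvRevGraphB pi).getD ((pi.length : Int)) [] = l := by
    simp [PySem.Dict.getD, hl]
  have hSpred : ∀ y ∈ pvNew [] l, pvPred pi y (pi.length : Int) := by
    intro y hy
    exact (pvMem_adj pi _ y).mp (by rw [hgdl]; exact (pvNew_subset l [] y hy).1)
  have hSform : ∀ v ∈ pvNew [] l, ∃ i, i < pi.length ∧ v = (i : Int) ∧ pvReach pi i := by
    intro v hv
    obtain ⟨i, hi, rfl, hd⟩ := hSpred v hv
    exact ⟨i, hi, rfl, pvReach.base pi i hi hd⟩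
  have hSnd : (pvNew [] l).Nodup := by
    simpa using pvNew_append_nodup l [] (by simp)
  have hSlen : (pvNew [] l).length ≤ pi.length :=
    pvLen_le pi _ hSnd (fun v hv => (hSform v hv).imp fun i h => ⟨h.1, h.2.1, trivial⟩)
  obtain ⟨hAsound, hAcomplete, hAnd⟩ := pvDFS_main pi (pi.length + 1) (pvNew [] l) (pvNew [] l)
    (by omega) (fun x hx => Or.inr hx) hSform
    (by
      intro y hy
      rcases hy with rfl | hy
      · right
        intro p hp
        have hpl : p ∈ l := by rw [← hgdl]; exact (pvMem_adj pi _ p).mpr hp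
        simpa using pvMem_new l [] p hpl
      · left; exact hy)
    hSnd
  have hr0len : (List.replicate pi.length false).length = pi.length := by simp
  have hr0sound : pvSound pi (List.replicate pi.length false) := by
    intro j hj hg
    rw [show pvGetB (List.replicate pi.length false) j = false from List.getD_replicate false hj] at hg
    cases hg
  have hr0count : (List.replicate pi.length false).count true = 0 := by
    simp [List.count_replicate]
  obtain ⟨hBsound, hBcomplete, hBlen⟩ :=
    pvSweep_main pi (pi.length + 1) (List.replicate pi.length false) hr0len hr0sound (by omega)
  set rf := pvSweep (pvDests pi) ((pi.length : Int)) (pi.length + 1)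
    (List.replicate pi.length false) with hrf
  set visA := pvLoopB (pvRevGraphB pi) (pi.length + 1) (pvNew [] l) (pvNew [] l) with hvisA
  set altL := (PySem.List.pyRange 0 ((pi.length : Int)) 1).filter
    (fun line => PySem.List.pyGetD rf line false) with haltL
  have haltmem : ∀ v, v ∈ altL ↔ ∃ i, i < pi.length ∧ v = (i : Int) ∧ pvReach pi i := by
    intro v
    constructor
    · intro hv
      obtain ⟨hvr, hvf⟩ := List.mem_filter.mp hv
      rw [PySem.List.mem_pyRange_one] at hvr
      refine ⟨v.toNat, by omega, (Int.toNat_of_nonneg hvr.1).symm, ?_⟩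
      apply hBsound v.toNat (by omega)
      have hh := pvGetB_pyGetD rf v hvr.1 (by rw [hBlen]; exact hvr.2)
      rw [hh] at hvf
      exact hvf
    · rintro ⟨i, hi, rfl, hre⟩
      apply List.mem_filter.mpr
      refine ⟨?_, ?_⟩
      · rw [PySem.List.mem_pyRange_one]
        constructor <;> omega
      · show PySem.List.pyGetD rf ((i : Nat) : Int) false = true
        rw [pvGetB_pyGetD rf ((i : Nat) : Int) (by omega) (by rw [hBlen]; exact_mod_cast hi)]
        simpa using hBcomplete i hre
  have hvisAmem : ∀ v, v ∈ visA ↔ ∃ i, i < pi.length ∧ v = (i : Int) ∧ pvReach pi i := by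
    intro v
    constructor
    · exact hAsound v
    · rintro ⟨i, hi, rfl, hre⟩
      exact hAcomplete i hre
  have haltpw : altL.Pairwise (fun a b => a < b) :=
    List.Pairwise.filter _ (PySem.List.pairwise_lt_pyRange_one 0 ((pi.length : Int)))
  have haltnd : altL.Nodup := haltpw.imp (fun h => ne_of_lt h)
  have hperm : altL.Perm visA :=
    (List.perm_ext_iff_of_nodup haltnd hAnd).mpr (fun a => (haltmem a).trans (hvisAmem a).symm)
  exact PySem.List.sorted_eq_of_perm_of_pairwise_lt visA altL (fun x => x) hperm haltpw
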